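-- pv_equiv track=rewrite | github.com/huytq000605/GrindLC | Easy Guys/Remove Colored Pieces if Both Neighbors are the Same Color/solution.py | winnerOfGame
-- ===== SOURCE A (Python) =====
-- def winnerOfGame(colors: str) -> bool:
--     A, B = 0, 0
--     for i in range(1, len(colors) - 1):
--         if colors[i] == colors[i-1] == colors[i+1]:
--             if colors[i] == "A":
--                 A += 1
--             else:
--                 B += 1
--     return A > B
-- ===== SOURCE B (Python) =====
-- def winnerOfGame(colors: str) -> bool:
--     a = b = 0
--     i = 0
--     n = len(colors)
--     while i < n:
--         j = i
--         while j < n and colors[j] == colors[i]: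
--             j += 1
--         run = j - i
--         if run > 2:
--             if colors[i] == "A":
--                 a += run - 2
--             else:
--                 b += run - 2
--         i = j
--     return a > b
-- ===== Notes on version B (the rewrite author's own statement) =====
-- stated objective: alternative
-- what changed: Replaces the per-index sliding triple test with a run-length segmentation: the string is split into maximal runs of equal characters and each run of length L contributes max(0, L-2) to its player's tally.
import Mathlib
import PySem

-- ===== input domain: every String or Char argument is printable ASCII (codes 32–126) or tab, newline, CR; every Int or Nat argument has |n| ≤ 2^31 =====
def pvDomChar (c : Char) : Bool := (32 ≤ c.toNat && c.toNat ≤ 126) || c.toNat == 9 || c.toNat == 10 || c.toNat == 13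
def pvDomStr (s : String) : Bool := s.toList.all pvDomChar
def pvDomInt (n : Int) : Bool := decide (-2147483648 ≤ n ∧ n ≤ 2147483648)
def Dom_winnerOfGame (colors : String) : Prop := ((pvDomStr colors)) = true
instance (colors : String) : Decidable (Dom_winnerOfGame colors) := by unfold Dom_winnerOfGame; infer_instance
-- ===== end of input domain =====

-- B replaces A's per-index sliding triple test by a run-length segmentation (each maximal
-- run of length L contributes max(0, L-2) to its player's tally); objective: alternative.

-- ===== PORT A =====
-- the body of A's for-loop: window test at index i, chained comparison ported as two equalities
def winnerOfGameStep (cs : List Char) (st : Int × Int) (i : Int) : Int × Int :=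
  if PySem.List.pyGet? cs i = PySem.List.pyGet? cs (i - 1) ∧
     PySem.List.pyGet? cs (i - 1) = PySem.List.pyGet? cs (i + 1) then
    if PySem.List.pyGet? cs i = some 'A' then (st.1 + 1, st.2) else (st.1, st.2 + 1)
  else st

def winnerOfGame (colors : String) : Bool :=
  let cs := colors.toList
  let st := (PySem.List.pyRange 1 ((cs.length : Int) - 1) 1).foldl (winnerOfGameStep cs) (0, 0)
  decide (st.1 > st.2)

-- ===== PORT B =====
-- inner while loop of Source B: how many leading characters equal c
def winnerOfGameRunLen (c : Char) : List Char → Nat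
  | [] => 0
  | x :: xs => if x = c then winnerOfGameRunLen c xs + 1 else 0

-- outer while loop of Source B: consume one maximal run per step
def winnerOfGameGo (cs : List Char) (a b : Int) : Bool :=
  match cs with
  | [] => decide (a > b)
  | c :: rest =>
      let k := winnerOfGameRunLen c rest
      let run : Int := (k : Int) + 1
      if run > 2 then
        if c = 'A' then winnerOfGameGo (rest.drop k) (a + (run - 2)) b
        else winnerOfGameGo (rest.drop k) a (b + (run - 2))
      else winnerOfGameGo (rest.drop k) a b
termination_by cs.length
decreasing_by all_goals simp [List.length_drop]

def winnerOfGame_alt (colors : String) : Bool :=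
  winnerOfGameGo colors.toList 0 0

-- ===== PRECONDITION & SPEC =====
def Spec_winnerOfGame (colors : String) (out : Bool) : Prop := out = winnerOfGame_alt colors
instance (colors : String) (out : Bool) : Decidable (Spec_winnerOfGame colors out) := by unfold Spec_winnerOfGame; infer_instance

-- ===== CLAIM (what is proved, stated in full; the proofs are below) =====
def Claim_equal_winnerOfGame : Prop := ∀ (colors : String), Dom_winnerOfGame colors → Spec_winnerOfGame colors (winnerOfGame colors)

-- ===== LEMMAS AND PROOFS =====

-- reference sliding-window count, window (prev, cur, next), same state shape as A's step
def twRef (st : Int × Int) : List Char → Int × Int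
  | a :: b :: c :: rest =>
      twRef (if b = a ∧ a = c then (if b = 'A' then (st.1 + 1, st.2) else (st.1, st.2 + 1)) else st)
        (b :: c :: rest)
  | _ => st

lemma twRef_cons3 (st : Int × Int) (a b c : Char) (rest : List Char) :
    twRef st (a :: b :: c :: rest)
      = twRef (if b = a ∧ a = c then (if b = 'A' then (st.1 + 1, st.2) else (st.1, st.2 + 1)) else st)
          (b :: c :: rest) := rfl

lemma twRef_short (st : Int × Int) (l : List Char) (h : l.length ≤ 2) : twRef st l = st := by
  match l with
  | [] => rfl
  | [_] => rfl
  | [_, _] => rfl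
  | _ :: _ :: _ :: _ => simp at h

lemma twRef_add (cs : List Char) : ∀ (st : Int × Int),
    twRef st cs = (st.1 + (twRef (0, 0) cs).1, st.2 + (twRef (0, 0) cs).2) := by
  induction cs with
  | nil => intro st; simp [twRef]
  | cons a l ih =>
    intro st
    match l with
    | [] => simp [twRef]
    | [_] => simp [twRef]
    | b :: c :: rest =>
      rw [twRef_cons3, twRef_cons3 (0, 0), ih, ih
        (if b = a ∧ a = c then (if b = 'A' then (((0:Int), (0:Int)).1 + 1, ((0:Int), (0:Int)).2)
          else (((0:Int), (0:Int)).1, ((0:Int), (0:Int)).2 + 1)) else (0, 0))]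
      split_ifs <;> simp <;> ring

-- A's indexed fold from position j+1 equals the window count over the suffix
lemma foldA (cs : List Char) : ∀ (n j : Nat) (st : Int × Int), cs.length - j = n →
    (PySem.List.pyRange ((j : Int) + 1) ((cs.length : Int) - 1) 1).foldl (winnerOfGameStep cs) st
      = twRef st (cs.drop j) := by
  intro n
  induction n using Nat.strong_induction_on with
  | _ n ih =>
    intro j st hn
    by_cases h3 : j + 3 ≤ cs.length
    · obtain ⟨a, b, c, t, hd⟩ : ∃ a b c t, cs.drop j = a :: b :: c :: t := by
        have hlen : 3 ≤ (cs.drop j).length := by simp [List.length_drop]; omega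
        match e : cs.drop j with
        | a :: b :: c :: t => exact ⟨a, b, c, t, rfl⟩
        | [] => rw [e] at hlen; simp at hlen
        | [_] => rw [e] at hlen; simp at hlen
        | [_, _] => rw [e] at hlen; simp at hlen
      have ga : cs[j]? = some a := by
        have h : (cs.drop j)[0]? = cs[j + 0]? := List.getElem?_drop
        rw [hd] at h; simpa using h.symm
      have gb : cs[j + 1]? = some b := by
        have h : (cs.drop j)[1]? = cs[j + 1]? := List.getElem?_drop
        rw [hd] at h; simpa using h.symm
      have gc : cs[j + 2]? = some c := by
        have h : (cs.drop j)[2]? = cs[j + 2]? := List.getElem?_drop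
        rw [hd] at h; simpa using h.symm
      have hlt : (j : Int) + 1 < (cs.length : Int) - 1 := by omega
      rw [PySem.List.pyRange_one_cons hlt, List.foldl_cons]
      have e1 : (j : Int) + 1 - 1 = ((j : Nat) : Int) := by ring
      have e3 : (j : Int) + 1 + 1 = (((j + 2 : Nat)) : Int) := by push_cast; ring -- cast
      have e2 : (j : Int) + 1 = (((j + 1 : Nat)) : Int) := by push_cast; ring -- cast
      have hstep : winnerOfGameStep cs st ((j : Int) + 1)
          = (if b = a ∧ a = c then (if b = 'A' then (st.1 + 1, st.2) else (st.1, st.2 + 1)) else st) := by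
        unfold winnerOfGameStep
        rw [e1, e3, e2, PySem.List.pyGet?_natCast, PySem.List.pyGet?_natCast,
          PySem.List.pyGet?_natCast, ga, gb, gc]
        simp
      rw [hstep]
      have hdj1 : cs.drop (j + 1) = b :: c :: t := by
        have h1 : cs.drop (j + 1) = (cs.drop j).drop 1 := by rw [List.drop_drop]
        rw [h1, hd]; rfl
      have hrec := ih (cs.length - (j + 1)) (by omega) (j + 1)
        (if b = a ∧ a = c then (if b = 'A' then (st.1 + 1, st.2) else (st.1, st.2 + 1)) else st) rfl
      rw [hdj1] at hrec
      have ecast : ((j : Int) + 1) + 1 = (((j + 1 : Nat)) : Int) + 1 := by push_cast; ring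
      rw [ecast, hrec, hd, twRef_cons3]
    · have hnil : PySem.List.pyRange ((j : Int) + 1) ((cs.length : Int) - 1) 1 = [] := by
        apply PySem.List.pyRange_one_eq_nil; omega
      rw [hnil, List.foldl_nil, twRef_short]
      simp [List.length_drop]; omega

lemma runLen_le (c : Char) (l : List Char) : winnerOfGameRunLen c l ≤ l.length := by
  induction l with
  | nil => simp [winnerOfGameRunLen]
  | cons x xs ih =>
    by_cases h : x = c
    · simp [winnerOfGameRunLen, h]; omega
    · simp [winnerOfGameRunLen, h]

lemma runLen_take (c : Char) (l : List Char) :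
    l.take (winnerOfGameRunLen c l) = List.replicate (winnerOfGameRunLen c l) c := by
  induction l with
  | nil => rfl
  | cons x xs ih =>
    by_cases h : x = c
    · simp [winnerOfGameRunLen, h, List.replicate_succ, ih]
    · simp [winnerOfGameRunLen, h]

lemma runLen_drop_head (c : Char) (l : List Char) :
    ∀ x, (l.drop (winnerOfGameRunLen c l)).head? = some x → x ≠ c := by
  induction l with
  | nil => intro x h; simp at h
  | cons y ys ih =>
    intro x h
    by_cases hy : y = c
    · simp [winnerOfGameRunLen, hy] at h
      exact ih x (by simpa using h)
    · simp [winnerOfGameRunLen, hy] at h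
      subst h; exact hy

-- one maximal run's contribution to the window count
lemma twRef_run (c : Char) : ∀ (k : Nat) (r : List Char), (∀ x, r.head? = some x → x ≠ c) →
    twRef (0, 0) (List.replicate (k + 1) c ++ r)
      = (if c = 'A'
          then ((twRef (0, 0) r).1 + (if k ≥ 2 then (k : Int) - 1 else 0), (twRef (0, 0) r).2)
          else ((twRef (0, 0) r).1, (twRef (0, 0) r).2 + (if k ≥ 2 then (k : Int) - 1 else 0))) := by
  intro k
  induction k using Nat.strong_induction_on with
  | _ k ih =>
    intro r hr
    match k with
    | 0 =>
      simp only [List.replicate_succ, List.replicate_zero, List.cons_append, List.nil_append]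
      match r with
      | [] => rw [twRef_short _ _ (by simp)]; simp [twRef_short]
      | [x] => rw [twRef_short _ _ (by simp)]; simp [twRef_short]
      | x :: y :: t =>
        have hx : x ≠ c := hr x rfl
        rw [twRef_cons3, if_neg (show ¬ (x = c ∧ c = y) from fun h => hx h.1)]
        simp
    | 1 =>
      have hrep : List.replicate (1 + 1) c ++ r = c :: c :: r := by simp [List.replicate_succ]
      rw [hrep]
      match r with
      | [] => rw [twRef_short _ _ (by simp)]; simp [twRef_short]
      | x :: t =>
        have hx : x ≠ c := hr x rfl
        rw [twRef_cons3, if_neg (show ¬ (c = c ∧ c = x) from fun h => hx h.2.symm)]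
        have h0 := ih 0 (by omega) (x :: t) hr
        simp at h0
        rw [h0]
        split_ifs <;> simp
    | (j + 2) =>
      have hrep : List.replicate (j + 2 + 1) c ++ r = c :: c :: c :: (List.replicate j c ++ r) := by
        simp [List.replicate_succ]
      rw [hrep, twRef_cons3, if_pos (show (c = c ∧ c = c) from ⟨rfl, rfl⟩), twRef_add]
      have hrep2 : c :: c :: (List.replicate j c ++ r) = List.replicate (j + 1 + 1) c ++ r := by
        simp [List.replicate_succ]
      rw [hrep2, ih (j + 1) (by omega) r hr]
      split_ifs <;> simp only [Prod.mk.injEq] <;> constructor <;> push_cast <;> omega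

-- B's run loop computes the comparison of the total window counts
lemma goB : ∀ (n : Nat) (cs : List Char), cs.length = n → ∀ (a b : Int),
    winnerOfGameGo cs a b
      = decide (a + (twRef (0, 0) cs).1 > b + (twRef (0, 0) cs).2) := by
  intro n
  induction n using Nat.strong_induction_on with
  | _ n ih =>
    intro cs hn a b
    match cs with
    | [] => simp [winnerOfGameGo, twRef]
    | c :: rest =>
      rw [winnerOfGameGo]
      have hk := runLen_le c rest
      simp only [List.length_cons] at hn
      have hsplit : c :: rest = List.replicate (winnerOfGameRunLen c rest + 1) c
          ++ rest.drop (winnerOfGameRunLen c rest) := by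
        conv_lhs => rw [← List.take_append_drop (winnerOfGameRunLen c rest) rest]
        rw [runLen_take]
        simp [List.replicate_succ]
      have htw : twRef (0, 0) (c :: rest)
          = (if c = 'A'
              then ((twRef (0, 0) (rest.drop (winnerOfGameRunLen c rest))).1
                      + (if winnerOfGameRunLen c rest ≥ 2 then (winnerOfGameRunLen c rest : Int) - 1 else 0),
                    (twRef (0, 0) (rest.drop (winnerOfGameRunLen c rest))).2)
              else ((twRef (0, 0) (rest.drop (winnerOfGameRunLen c rest))).1,
                    (twRef (0, 0) (rest.drop (winnerOfGameRunLen c rest))).2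
                      + (if winnerOfGameRunLen c rest ≥ 2 then (winnerOfGameRunLen c rest : Int) - 1 else 0))) := by
        conv_lhs => rw [hsplit]
        exact twRef_run c (winnerOfGameRunLen c rest) _ (runLen_drop_head c rest)
      have hlen : (rest.drop (winnerOfGameRunLen c rest)).length < n := by
        simp only [List.length_drop]; omega
      rw [htw]
      split_ifs <;> (rw [ih _ hlen _ rfl, decide_eq_decide]; push_cast; omega)

-- ===== VERDICT (by name: the statement is the Claim_ definition above) =====
theorem winnerOfGame_spec : Claim_equal_winnerOfGame := by
  intro colors _
  unfold Spec_winnerOfGame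
  simp only [winnerOfGame, winnerOfGame_alt]
  have h0 : (PySem.List.pyRange 1 ((colors.toList.length : Int) - 1) 1).foldl
      (winnerOfGameStep colors.toList) (0, 0) = twRef (0, 0) colors.toList := by
    have h := foldA colors.toList (colors.toList.length) 0 (0, 0) rfl
    simpa using h
  rw [h0, goB colors.toList.length colors.toList rfl 0 0]
  simp
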